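-- pv_equiv track=rewrite | github.com/kafkapple/MonoFusion | preproc/compute_raw_moge_depth.py | _ordered_camera_ids
-- ===== SOURCE A (Python) =====
-- from typing import Iterable, Sequence
--
-- def _ordered_camera_ids(camera_ids: Iterable[int]) -> list[int]:
--     seen = set()
--     ordered: list[int] = []
--     for cam in camera_ids:
--         if cam in seen:
--             continue
--         if cam < 0:
--             raise ValueError(f"Camera id must be non-negative, got {cam}")
--         seen.add(cam)
--         ordered.append(cam)
--     ordered.sort()
--     if not ordered:
--         raise ValueError("camera_ids cannot be empty")
--     return ordered
-- ===== SOURCE B (Python) =====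
-- def _ordered_camera_ids(camera_ids):
--     ids = list(camera_ids)
--     for cam in ids:
--         if cam < 0:
--             raise ValueError(f"Camera id must be non-negative, got {cam}")
--     if not ids:
--         raise ValueError("camera_ids cannot be empty")
--     ids.sort()
--     result = []
--     for cam in ids:
--         if not result or cam != result[-1]:
--             result.append(cam)
--     return result
-- ===== Notes on version B (the rewrite author's own statement) =====
-- stated objective: alternative
-- what changed: Replaces A's hash-set first-occurrence dedup followed by a sort with validate-then-sort followed by an adjacent-duplicate scan (no set is maintained; duplicates are detected by comparing with the last appended element).
import Mathlib
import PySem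

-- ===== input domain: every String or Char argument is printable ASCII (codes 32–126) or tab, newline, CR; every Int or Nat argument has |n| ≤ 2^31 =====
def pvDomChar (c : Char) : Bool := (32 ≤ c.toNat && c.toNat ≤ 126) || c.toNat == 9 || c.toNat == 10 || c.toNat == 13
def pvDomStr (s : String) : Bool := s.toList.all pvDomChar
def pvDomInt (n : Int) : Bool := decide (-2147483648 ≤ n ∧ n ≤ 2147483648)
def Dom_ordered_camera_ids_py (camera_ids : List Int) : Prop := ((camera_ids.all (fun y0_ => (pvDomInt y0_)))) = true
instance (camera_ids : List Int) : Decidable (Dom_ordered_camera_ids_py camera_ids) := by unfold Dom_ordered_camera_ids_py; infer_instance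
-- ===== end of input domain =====

-- B replaces A's hash-set dedup-then-sort with sort-then-adjacent-dedup (alternative decomposition, same cost).


-- ===== PORT A =====
-- the two 'raise ValueError' paths (a negative id, an empty list) are exactly the inputs Pre_ excludes
def ordered_camera_ids_py (camera_ids : List Int) : List Int :=
  let st := camera_ids.foldl
    (fun (st : PySem.Set Int × List Int) cam =>
      if PySem.Set.contains st.1 cam then st
      else (PySem.Set.add st.1 cam, st.2 ++ [cam]))
    (PySem.Set.empty, [])
  PySem.List.sorted st.2 (fun x => x) false

-- ===== PORT B =====
-- same raise paths as A, excluded by the same Pre_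
def ordered_camera_ids_py_alt (camera_ids : List Int) : List Int :=
  let ids := PySem.List.sorted camera_ids (fun x => x) false
  ids.foldl
    (fun (result : List Int) cam =>
      if result = [] ∨ cam ≠ PySem.List.pyGetD result (-1) 0 then result ++ [cam] else result)
    []

-- ===== PRECONDITION & SPEC =====
-- Pre_ excludes exactly the inputs where the Python raises ValueError: an empty list, or any negative id
def Pre_ordered_camera_ids_py (camera_ids : List Int) : Prop :=
  camera_ids ≠ [] ∧ ∀ x ∈ camera_ids, 0 ≤ x
instance (camera_ids : List Int) : Decidable (Pre_ordered_camera_ids_py camera_ids) := by unfold Pre_ordered_camera_ids_py; infer_instance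
def pvWitness_ordered_camera_ids_py : List Int := [3, 1, 3, 2, 1]
def Spec_ordered_camera_ids_py (camera_ids : List Int) (out : List Int) : Prop := out = ordered_camera_ids_py_alt camera_ids
instance (camera_ids : List Int) (out : List Int) : Decidable (Spec_ordered_camera_ids_py camera_ids out) := by unfold Spec_ordered_camera_ids_py; infer_instance

-- ===== CLAIM (what is proved, stated in full; the proofs are below) =====
def Claim_equal_ordered_camera_ids_py : Prop := ∀ (camera_ids : List Int), Dom_ordered_camera_ids_py camera_ids → Pre_ordered_camera_ids_py camera_ids → Spec_ordered_camera_ids_py camera_ids (ordered_camera_ids_py camera_ids)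

-- ===== LEMMAS AND PROOFS =====

-- A's loop keeps seen and ordered equal: it is set(xs) built by repeated add
lemma set_add_pair (a : List Int) (c : Int) :
    (if PySem.Set.contains a c then ((a : PySem.Set Int), a)
     else (PySem.Set.add a c, a ++ [c])) = (PySem.Set.add a c, PySem.Set.add a c) := by
  by_cases h : c ∈ a <;> simp [PySem.Set.add, PySem.Set.contains, h]

-- A's loop keeps seen and ordered equal: it is set(xs) built by repeated add
lemma fold_pair_eq (s : List Int) (a : PySem.Set Int) :
    s.foldl
      (fun (st : PySem.Set Int × List Int) cam =>
        if PySem.Set.contains st.1 cam then st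
        else (PySem.Set.add st.1 cam, st.2 ++ [cam]))
      (a, a) = (s.foldl PySem.Set.add a, s.foldl PySem.Set.add a) := by
  induction s generalizing a with
  | nil => rfl
  | cons c t ih =>
    simp only [List.foldl_cons]
    rw [set_add_pair a c]
    exact ih (PySem.Set.add a c)

-- every element of a strictly increasing list is ≤ its last element
lemma mem_le_getLast (l : List Int) (h : l.Pairwise (· < ·)) (a : Int) (ha : a ∈ l)
    (hne : l ≠ []) : a ≤ l.getLast hne := by
  induction l with
  | nil => cases ha
  | cons x t ih =>
    rcases List.mem_cons.mp ha with rfl | hat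
    · cases t with
      | nil => simp
      | cons y u =>
        have : a < (y :: u).getLast (by simp) :=
          (List.pairwise_cons.mp h).1 _ (List.getLast_mem _)
        simpa [List.getLast_cons] using this.le
    · have ht : t ≠ [] := List.ne_nil_of_mem hat
      have := ih (List.pairwise_cons.mp h).2 hat ht
      simpa [List.getLast_cons ht] using this

-- B's adjacent-dedup fold: on a ≤-sorted tail it yields a strictly increasing list with the expected membership
lemma dedup_fold (s : List Int) :
    ∀ (acc : List Int), acc.Pairwise (· < ·) → s.Pairwise (· ≤ ·) →
      (∀ a ∈ acc, ∀ b ∈ s, a ≤ b) →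
      (s.foldl
        (fun (result : List Int) cam =>
          if result = [] ∨ cam ≠ PySem.List.pyGetD result (-1) 0 then result ++ [cam] else result)
        acc).Pairwise (· < ·) ∧
      ∀ x, (x ∈ s.foldl
        (fun (result : List Int) cam =>
          if result = [] ∨ cam ≠ PySem.List.pyGetD result (-1) 0 then result ++ [cam] else result)
        acc ↔ x ∈ acc ∨ x ∈ s) := by
  induction s with
  | nil => intro acc hacc _ _; simpa using hacc
  | cons c t ih =>
    intro acc hacc hs hcross
    have hct : ∀ b ∈ t, c ≤ b := (List.pairwise_cons.mp hs).1
    have ht : t.Pairwise (· ≤ ·) := (List.pairwise_cons.mp hs).2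
    simp only [List.foldl_cons]
    by_cases hcond : acc = [] ∨ c ≠ PySem.List.pyGetD acc (-1) 0
    · rw [if_pos hcond]
      have hlt : ∀ a ∈ acc, a < c := by
        intro a ha
        have hne : acc ≠ [] := List.ne_nil_of_mem ha
        have hcne : c ≠ PySem.List.pyGetD acc (-1) 0 := by tauto
        have hlast : PySem.List.pyGetD acc (-1) 0 = acc.getLast hne :=
          PySem.List.pyGetD_neg_one acc 0 hne
        have h1 : a ≤ acc.getLast hne := mem_le_getLast acc hacc a ha hne
        have h2 : acc.getLast hne ≤ c :=
          hcross _ (List.getLast_mem hne) c (List.mem_cons_self)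
        have h3 : acc.getLast hne ≠ c := by rw [hlast] at hcne; exact fun e => hcne e.symm
        omega
      have hacc' : (acc ++ [c]).Pairwise (· < ·) := by
        refine List.pairwise_append.mpr ⟨hacc, by simp, ?_⟩
        intro a ha b hb; simp at hb; subst hb; exact hlt a ha
      have hcross' : ∀ a ∈ acc ++ [c], ∀ b ∈ t, a ≤ b := by
        intro a ha b hb
        rcases List.mem_append.mp ha with h | h
        · exact hcross a h b (List.mem_cons_of_mem _ hb)
        · simp at h; subst h; exact hct b hb
      obtain ⟨p1, p2⟩ := ih (acc ++ [c]) hacc' ht hcross'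
      refine ⟨p1, fun x => ?_⟩
      rw [p2 x]; simp [or_assoc, or_comm, or_left_comm]
    · rw [if_neg hcond]
      push Not at hcond
      obtain ⟨hne, hceq⟩ := hcond
      have hcmem : c ∈ acc := by
        rw [hceq, PySem.List.pyGetD_neg_one acc 0 hne]; exact List.getLast_mem hne
      have hcross' : ∀ a ∈ acc, ∀ b ∈ t, a ≤ b := by
        intro a ha b hb; exact hcross a ha b (List.mem_cons_of_mem _ hb)
      obtain ⟨p1, p2⟩ := ih acc hacc ht hcross'
      refine ⟨p1, fun x => ?_⟩
      rw [p2 x]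
      constructor
      · rintro (h | h)
        · exact Or.inl h
        · exact Or.inr (List.mem_cons_of_mem _ h)
      · rintro (h | h)
        · exact Or.inl h
        · rcases List.mem_cons.mp h with rfl | h
          · exact Or.inl hcmem
          · exact Or.inr h

-- ===== VERDICT (by name: the statement is the Claim_ definition above) =====
theorem ordered_camera_ids_py_spec : Claim_equal_ordered_camera_ids_py := by
  intro xs _ _
  unfold Spec_ordered_camera_ids_py ordered_camera_ids_py ordered_camera_ids_py_alt
  simp only []
  rw [show (PySem.Set.empty : PySem.Set Int) = ([] : List Int) from rfl]
  rw [fold_pair_eq xs []]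
  have hofl : xs.foldl PySem.Set.add ([] : List Int) = PySem.Set.ofList xs :=
    (PySem.Set.ofList_eq_foldl xs).symm
  rw [hofl]
  -- B's side
  set r := (PySem.List.sorted xs (fun x => x) false).foldl
      (fun (result : List Int) cam =>
        if result = [] ∨ cam ≠ PySem.List.pyGetD result (-1) 0 then result ++ [cam] else result)
      [] with hr
  have hsorted : (PySem.List.sorted xs (fun x => x) false).Pairwise (· ≤ ·) := by
    simpa using PySem.List.sorted_pairwise xs (fun x => x)
  obtain ⟨hpair, hmem⟩ := dedup_fold (PySem.List.sorted xs (fun x => x) false) []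
    (by simp) hsorted (by simp)
  rw [← hr] at hpair hmem
  have hmem' : ∀ x, x ∈ r ↔ x ∈ xs := by
    intro x; rw [hmem x]; simp [PySem.List.mem_sorted]
  have hperm : r.Perm (PySem.Set.ofList xs) := by
    rw [List.perm_ext_iff_of_nodup hpair.nodup (PySem.Set.nodup_ofList xs)]
    intro x; rw [hmem' x, PySem.Set.mem_ofList]
  have hfin := PySem.List.sorted_eq_of_perm_of_pairwise_lt (PySem.Set.ofList xs) r
    (fun x => x) hperm (by simpa using hpair)
  simpa using hfin
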